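-- pv_equiv track=rewrite | github.com/jayteealao/adventofcode | advent1.py | fuel_per_weight_of_fuel
-- ===== SOURCE A (Python) =====
-- def calc(mass):
--     """ Assumes mass is an integer
--                 mass >= 0
--         for a given mass this function calculates the fuel required
--         Returns an integer such that (result + 2) * 3 = mass
--
--         >>> calc(12)
--         2
--         >>> calc(14)
--         2
--         >>> calc(1969)
--         654
--         >>> calc(100756)
--         33583
--     """
--     return (mass // 3) - 2
--
-- def fuel_per_weight_of_fuel(fuelweight):
--     """ Assumes fuelweight is an integer of only one element an integer
--             fuelweight >= 0
--         returns the total fuel requirement for each gram of fuel and the fuel for each fuel subsequently added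
--         >>> fuel_per_weight_of_fuel(14)
--         2
--         >>> fuel_per_weight_of_fuel(12)
--         2
--     """
--     if fuelweight <= 0 :
--         return 0
--     elif calc(fuelweight) <= 0 :
--         return 0
--     else:
--         res = calc(fuelweight)
--         return res + fuel_per_weight_of_fuel(res)
-- ===== SOURCE B (Python) =====
-- def fuel_per_weight_of_fuel(fuelweight):
--     total = 0
--     current = fuelweight
--     while True:
--         res = current // 3 - 2
--         if res <= 0:
--             return total
--         total += res
--         current = res
-- ===== Notes on version B (the rewrite author's own statement) =====
-- stated objective: simpler
-- what changed: Replaces the recursion over successively smaller fuel weights with an iterative while-loop keeping a running total and the current weight.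
import Mathlib
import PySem

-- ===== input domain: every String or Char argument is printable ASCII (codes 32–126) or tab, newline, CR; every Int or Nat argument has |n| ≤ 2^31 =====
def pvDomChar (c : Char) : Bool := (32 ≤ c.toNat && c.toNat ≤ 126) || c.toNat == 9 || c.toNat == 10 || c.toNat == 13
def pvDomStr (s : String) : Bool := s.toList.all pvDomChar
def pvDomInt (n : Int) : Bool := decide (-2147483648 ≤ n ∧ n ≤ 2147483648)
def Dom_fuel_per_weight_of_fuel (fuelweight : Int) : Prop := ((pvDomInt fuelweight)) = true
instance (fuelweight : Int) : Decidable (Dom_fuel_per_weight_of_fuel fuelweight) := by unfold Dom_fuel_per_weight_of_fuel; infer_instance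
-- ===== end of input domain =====

-- B replaces A's recursion with an iterative accumulator loop (simpler: constant stack, same values).

-- ===== PORT A =====
def calcFuel (mass : Int) : Int := PySem.Int.floordiv mass 3 - 2

theorem calcFuel_lt (f : Int) (h : 0 < f) : (calcFuel f).toNat < f.toNat := by
  unfold calcFuel
  rw [PySem.Int.floordiv_eq_ediv_of_pos (by omega : (0:Int) < 3)]
  have : f / 3 ≤ f := Int.ediv_le_self 3 (by omega)
  omega

def fuel_per_weight_of_fuel (fuelweight : Int) : Int :=
  if fuelweight ≤ 0 then 0
  else if calcFuel fuelweight ≤ 0 then 0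
  else
    let res := calcFuel fuelweight
    res + fuel_per_weight_of_fuel res
termination_by fuelweight.toNat
decreasing_by exact calcFuel_lt fuelweight (by omega)

-- ===== PORT B =====
-- res > 0 forces current ≥ 9, so the loop measure current.toNat strictly decreases
theorem fuelLoop_dec (c : Int) (h : ¬ PySem.Int.floordiv c 3 - 2 ≤ 0) :
    (PySem.Int.floordiv c 3 - 2).toNat < c.toNat := by
  have h3 : (3 : Int) ≤ PySem.Int.floordiv c 3 := by omega
  have hb : (3 : Int) * 3 ≤ c := by
    have := (PySem.Int.le_floordiv_iff_mul_le (a := c) (b := 3) (q := 3) (by omega)).mp h3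
    omega
  rw [PySem.Int.floordiv_eq_ediv_of_pos (by omega : (0:Int) < 3)] at h3 ⊢
  have : c / 3 ≤ c := Int.ediv_le_self 3 (by omega)
  omega

def fuelLoop (total current : Int) : Int :=
  let res := PySem.Int.floordiv current 3 - 2
  if res ≤ 0 then total
  else fuelLoop (total + res) res
termination_by current.toNat
decreasing_by exact fuelLoop_dec current (by assumption)

def fuel_per_weight_of_fuel_alt (fuelweight : Int) : Int := fuelLoop 0 fuelweight

-- ===== PRECONDITION & SPEC =====
def Spec_fuel_per_weight_of_fuel (fuelweight : Int) (out : Int) : Prop := out = fuel_per_weight_of_fuel_alt fuelweight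
instance (fuelweight : Int) (out : Int) : Decidable (Spec_fuel_per_weight_of_fuel fuelweight out) := by unfold Spec_fuel_per_weight_of_fuel; infer_instance

-- ===== CLAIM (what is proved, stated in full; the proofs are below) =====
def Claim_equal_fuel_per_weight_of_fuel : Prop := ∀ (fuelweight : Int), Dom_fuel_per_weight_of_fuel fuelweight → Spec_fuel_per_weight_of_fuel fuelweight (fuel_per_weight_of_fuel fuelweight)

-- ===== LEMMAS AND PROOFS =====
theorem fuelLoop_eq (t f : Int) : fuelLoop t f = t + fuel_per_weight_of_fuel f := by
  rw [fuelLoop, fuel_per_weight_of_fuel]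
  simp only [calcFuel]
  by_cases hr : PySem.Int.floordiv f 3 - 2 ≤ 0
  · simp only [hr, if_true]
    split_ifs <;> omega
  · have hf : ¬ f ≤ 0 := by
      intro hle
      have h3 : (3 : Int) ≤ PySem.Int.floordiv f 3 := by omega
      have := (PySem.Int.le_floordiv_iff_mul_le (a := f) (b := 3) (q := 3) (by omega)).mp h3
      omega
    simp only [hr, if_false, hf]
    rw [fuelLoop_eq (t + (PySem.Int.floordiv f 3 - 2)) (PySem.Int.floordiv f 3 - 2)]
    ring
termination_by f.toNat
decreasing_by exact fuelLoop_dec f (by assumption)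

-- ===== VERDICT (by name: the statement is the Claim_ definition above) =====
theorem fuel_per_weight_of_fuel_spec : Claim_equal_fuel_per_weight_of_fuel := by
  intro f _
  unfold Spec_fuel_per_weight_of_fuel fuel_per_weight_of_fuel_alt
  rw [fuelLoop_eq]
  omega
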